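-- pv_equiv track=rewrite | github.com/fazzolari17/projectEuler | problem_49.py | prime_permutations
-- ===== SOURCE A (Python) =====
-- import math
-- from itertools import permutations
--
-- def is_prime(n: int):
--     '''
--     Used to check if a number is prime.
--     '''
--     for i in range(2, int(math.sqrt(n)) + 1):
--         if n % i == 0 and i != n:
--             return False
--     return True
--
-- def find_arithmetic_nums(l: list):
--     '''
--     This function finds the arithmetic permutations, by using c = 2b - a.
--     '''
--     for i in range(len(l)):
--         for j in range(i+1, len(l)):
--             ans = 2*l[j] - l[i]
--             if ans in l:
--                 return (l[i], l[j], ans)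
--     return False
--
-- def prime_permutations(n):
--     answer = []
--     primes = []
--     for number in range(1000, n):
--         if is_prime(number):
--             num = [int(n) for n in str(number)]
--             perm_list = []
--             for perm in list(permutations(num)):
--                 if len(str(int(''.join(str(x) for x in perm)))) == 4:
--                     perm_list.append(int(''.join(str(x) for x in perm)))
--
--
--             perm_list = list(set(filter(is_prime, perm_list))) # Filter the prime numbers from the permutations
--             primes.append(perm_list)
--
--             for item in primes:
--                 # Filters the permutations that are three digits such that 1063 can be 0163 so that only 4 digit remain
--                 if len(item) < 3:
--                     continue
--                 else:
--                     if find_arithmetic_nums(item) != False: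
--                         answer.append(find_arithmetic_nums(item))
--
--
--     return set(answer) # Returned as a set to remove duplicates
-- ===== SOURCE B (Python) =====
-- import math
-- from itertools import permutations
--
--
-- def _is_prime(m):
--     return all(m % d for d in range(2, math.isqrt(m) + 1))
--
--
-- def _join(perm):
--     v = 0
--     for d in perm:
--         v = 10 * v + d
--     return v
--
--
-- def _first_triple(group):
--     members = set(group)
--     for i, a in enumerate(group):
--         for b in group[i + 1:]:
--             c = 2 * b - a
--             if c in members:
--                 return (a, b, c)
--     return None
--
--
-- def prime_permutations(n):
--     # One pass: the arithmetic triple of each prime's permutation group is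
--     # computed ONCE, instead of re-scanning the whole accumulated group list
--     # (and re-running the triple search on every earlier group) at every prime.
--     result = set()
--     for number in range(1000, n):
--         if not _is_prime(number):
--             continue
--         digits = [int(d) for d in str(number)]
--         group = list({v for v in map(_join, permutations(digits))
--                       if len(str(v)) == 4 and _is_prime(v)})
--         if len(group) >= 3:
--             t = _first_triple(group)
--             if t is not None:
--                 result.add(t)
--     return result
-- ===== Notes on version B (the rewrite author's own statement) =====
-- stated objective: faster
-- what changed: B computes each prime's permutation-group arithmetic triple once in a single pass (set membership for the c=2b-a test), instead of A's re-scan of every previously accumulated group — re-running the triple search on each of them — at every new prime.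
import Mathlib
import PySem

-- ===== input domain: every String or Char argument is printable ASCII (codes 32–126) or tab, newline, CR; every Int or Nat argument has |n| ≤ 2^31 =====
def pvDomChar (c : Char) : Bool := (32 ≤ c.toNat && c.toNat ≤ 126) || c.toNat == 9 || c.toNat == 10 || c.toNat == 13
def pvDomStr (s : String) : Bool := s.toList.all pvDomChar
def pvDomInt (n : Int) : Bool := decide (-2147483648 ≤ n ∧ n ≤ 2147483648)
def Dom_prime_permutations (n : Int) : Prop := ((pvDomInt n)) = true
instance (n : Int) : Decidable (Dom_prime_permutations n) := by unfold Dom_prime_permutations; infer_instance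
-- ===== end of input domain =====

-- B removes A's quadratic re-scan of all accumulated permutation groups (and its repeated
-- triple searches) by computing each group's arithmetic triple once; same return value.

-- ===== SHARED PYTHON-LIBRARY HELPERS (semantic primitives used by BOTH ports) =====

-- itertools.permutations, in CPython's order (index-lexicographic; duplicates kept).
def pyPermsAux {α : Type} : Nat → List α → List (List α)
  | 0, _ => [[]]
  | n+1, l =>
    (List.range l.length).flatMap (fun i =>
      match l[i]? with
      | none => []
      | some a => (pyPermsAux n (l.eraseIdx i)).map (fun p => a :: p))

def pyPerms {α : Type} (l : List α) : List (List α) := pyPermsAux l.length l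

-- CPython 'set' of ints, exact model of Objects/setobject.c (CPython 3.11) for NONNEGATIVE
-- elements < 2^61 (there hash(x) = x, and int hashing is not randomized): open addressing,
-- table size a power of two starting at 8, LINEAR_PROBES = 9, PERTURB_SHIFT = 5,
-- i = i*5 + 1 + (perturb >>= 5) probing, resize to used*4 (used*2 above 50000) as soon as
-- fill*5 >= mask*3, reinsertion in table-scan order; list(set(..)) is the table-scan order.
-- Every element put into a set by either Python program here is a nonnegative int < 2^61.
def cpySlots (mask i : Nat) : List Nat :=
  i :: (if i + 9 ≤ mask then (List.range 9).map (fun j => i + j + 1) else [])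

-- first free slot among a probe window (used during resize reinsertion, where the
-- element is known to be absent)
def cpyFindFree (t : Array (Option Nat)) : List Nat → Option Nat
  | [] => none
  | k :: rest => match t.getD k none with
    | none => some k
    | some _ => cpyFindFree t rest

def cpyCleanGo (h mask : Nat) : Nat → Nat → Nat → Array (Option Nat) → Array (Option Nat)
  | 0, _, _, t => t    -- fuel exhausted: unreachable on real probe sequences
  | fuel+1, perturb, i, t =>
    match cpyFindFree t (cpySlots mask i) with
    | some k => t.set! k (some h)
    | none =>
      let perturb' := perturb >>> 5
      cpyCleanGo h mask fuel perturb' ((i * 5 + 1 + perturb') &&& mask) t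

-- set_insert_clean
def cpyClean (t : Array (Option Nat)) (mask h : Nat) : Array (Option Nat) :=
  cpyCleanGo h mask ((mask + 2) * 64) h (h &&& mask) t

def cpyNewSizeGo (minused : Nat) : Nat → Nat → Nat
  | 0, cur => cur
  | f+1, cur => if cur ≤ minused then cpyNewSizeGo minused f (cur * 2) else cur

-- set_table_resize: new power-of-two size > minused, old entries reinserted in scan order
def cpyResize (t : Array (Option Nat)) (used minused : Nat) :
    Array (Option Nat) × Nat × Nat :=
  let ns := cpyNewSizeGo minused 64 8
  let mask := ns - 1
  ((t.toList.filterMap id).foldl (fun nt h => cpyClean nt mask h) (Array.replicate ns none),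
   mask, used)

-- probe a window: some (some k) = first free slot k; some none = element found; none = keep probing
def cpyProbe (t : Array (Option Nat)) (x : Nat) : List Nat → Option (Option Nat)
  | [] => none
  | k :: rest => match t.getD k none with
    | none => some (some k)
    | some y => if y = x then some none else cpyProbe t x rest

-- set_add_entry
def cpyAddGo (x mask fill : Nat) (t : Array (Option Nat)) :
    Nat → Nat → Nat → Array (Option Nat) × Nat × Nat
  | 0, _, _ => (t, mask, fill)   -- fuel exhausted: unreachable on real probe sequences
  | fuel+1, perturb, i =>
    match cpyProbe t x (cpySlots mask i) with
    | some (some k) =>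
      let t' := t.set! k (some x)
      let fill' := fill + 1
      if fill' * 5 ≥ mask * 3 then
        cpyResize t' fill' (if fill' > 50000 then fill' * 2 else fill' * 4)
      else (t', mask, fill')
    | some none => (t, mask, fill)
    | none =>
      let perturb' := perturb >>> 5
      cpyAddGo x mask fill t fuel perturb' ((i * 5 + 1 + perturb') &&& mask)

def cpyAdd (st : Array (Option Nat) × Nat × Nat) (x : Nat) : Array (Option Nat) × Nat × Nat :=
  cpyAddGo x st.2.1 st.2.2 st.1 ((st.2.1 + 2) * 64) x (x &&& st.2.1)

-- list(set(xs)) for a list of (nonnegative) ints, in CPython's table order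
def cpySetList (xs : List Int) : List Int :=
  let st := xs.foldl (fun st x => cpyAdd st x.toNat) (Array.replicate 8 none, 7, 0)
  (st.1.toList.filterMap id).map (fun h => (h : Int))

-- ===== PORT A =====

-- int(math.sqrt(m)): exact for 0 ≤ m ≤ 2^31 (double sqrt is correctly rounded and no
-- rounding crosses an integer below 2^52); is_prime is only applied to such ints here.
def intSqrtA (m : Int) : Int := Int.sqrt m

def is_prime (m : Int) : Bool :=
  -- 'for i in range(2, int(math.sqrt(n)) + 1): if n % i == 0 and i != n: return False'
  !((PySem.List.pyRange 2 (intSqrtA m + 1) 1).any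
      (fun i => PySem.Int.mod m i == 0 && i != m))

-- int(''.join(str(x) for x in perm)): each x is one decimal digit (0–9), so the joined
-- string is the base-10 numeral of this fold; exact.
def joinA (perm : List Int) : Int := perm.foldl (fun v d => 10 * v + d) 0

-- [int(d) for d in str(number)]: int of a single character of the numeral = its digit value;
-- number ≥ 1000 here, so the characters are exactly the decimal digits.
def digitsA (number : Int) : List Int :=
  (PySem.Int.toStr number).toList.map (fun c => ((c.toNat : Int) - 48))

def fanInnerA (l : List Int) (i : Int) : List Int → Option (List Int)
  | [] => none
  | j :: js =>
    let a := PySem.List.pyGetD l i 0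
    let b := PySem.List.pyGetD l j 0
    let ans := 2 * b - a
    if l.contains ans then some [a, b, ans] else fanInnerA l i js

def fanOuterA (l : List Int) : List Int → Option (List Int)
  | [] => none
  | i :: is =>
    match fanInnerA l i (PySem.List.pyRange (i + 1) (l.length : Int) 1) with
    | some t => some t
    | none => fanOuterA l is

-- find_arithmetic_nums: returns the tuple, or False (= none) — the caller only tests != False
def find_arithmetic_nums (l : List Int) : Option (List Int) :=
  fanOuterA l (PySem.List.pyRange 0 (l.length : Int) 1)

-- the inner 'for item in primes:' loop ('find_arithmetic_nums' is pure; Python calls it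
-- twice for the same value, the match binds that single value)
def stepScanA (answer : List (List Int)) (primes : List (List Int)) : List (List Int) :=
  primes.foldl (fun ans item =>
    if item.length < 3 then ans
    else match find_arithmetic_nums item with
      | some t => ans ++ [t]
      | none => ans) answer

def prime_permutations (n : Int) : List (List Int) :=
  let st := (PySem.List.pyRange 1000 n 1).foldl
    (fun (st : List (List Int) × List (List Int)) number =>
      if is_prime number then
        let num := digitsA number
        let permList := (pyPerms num).foldl
          (fun acc perm =>
            if PySem.Str.len (PySem.Int.toStr (joinA perm)) == 4 then acc ++ [joinA perm]
            else acc) []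
        let pl := cpySetList (permList.filter is_prime)
        let primes' := st.2 ++ [pl]
        (stepScanA st.1 primes', primes')
      else st)
    ([], [])
  PySem.Set.ofList st.1   -- return set(answer)

-- ===== PORT B =====

-- math.isqrt(m); m ≥ 1000 at every call
def isqrtB (m : Int) : Int := Int.sqrt m

def isPrimeB (m : Int) : Bool :=
  (PySem.List.pyRange 2 (isqrtB m + 1) 1).all (fun d => PySem.Int.mod m d != 0)

def joinB (perm : List Int) : Int := perm.foldl (fun v d => 10 * v + d) 0

def digitsB (number : Int) : List Int :=
  (PySem.Int.toStr number).toList.map (fun c => ((c.toNat : Int) - 48))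

def ftInnerB (members : PySem.Set Int) (a : Int) : List Int → Option (List Int)
  | [] => none
  | b :: bs =>
    let c := 2 * b - a
    if PySem.Set.contains members c then some [a, b, c] else ftInnerB members a bs

-- 'for i, a in enumerate(group): for b in group[i+1:]': at a = group[i] the slice
-- group[i+1:] is exactly the list tail after a
def ftOuterB (members : PySem.Set Int) : List Int → Option (List Int)
  | [] => none
  | a :: rest =>
    match ftInnerB members a rest with
    | some t => some t
    | none => ftOuterB members rest

def firstTripleB (group : List Int) : Option (List Int) :=
  ftOuterB (PySem.Set.ofList group) group

def groupB (number : Int) : List Int :=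
  let digits := digitsB number
  cpySetList (((pyPerms digits).map joinB).filter
    (fun v => PySem.Str.len (PySem.Int.toStr v) == 4 && isPrimeB v))

def prime_permutations_alt (n : Int) : List (List Int) :=
  (PySem.List.pyRange 1000 n 1).foldl
    (fun (result : List (List Int)) number =>
      if !(isPrimeB number) then result
      else
        let group := groupB number
        if 3 ≤ group.length then
          match firstTripleB group with
          | some t => PySem.Set.add result t
          | none => result
        else result) []

-- ===== PRECONDITION & SPEC =====
def Spec_prime_permutations (n : Int) (out : List (List Int)) : Prop := out = prime_permutations_alt n
instance (n : Int) (out : List (List Int)) : Decidable (Spec_prime_permutations n out) := by unfold Spec_prime_permutations; infer_instance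

-- ===== CLAIM (what is proved, stated in full; the proofs are below) =====
def Claim_equal_prime_permutations : Prop := ∀ (n : Int), Dom_prime_permutations n → Spec_prime_permutations n (prime_permutations n)

-- ===== LEMMAS AND PROOFS =====

theorem mem_sqrt_range_ne {m i : Int}
    (hi : i ∈ PySem.List.pyRange 2 (Int.sqrt m + 1) 1) : i ≠ m := by
  rw [PySem.List.mem_pyRange_one] at hi
  obtain ⟨h2, hlt⟩ := hi
  have hle : i ≤ Int.sqrt m := by omega
  have h2' : (2 : Nat) ≤ Nat.sqrt m.toNat := by
    have : (2 : Int) ≤ (Nat.sqrt m.toNat : Int) := le_trans h2 (by simpa [Int.sqrt] using hle)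
    exact_mod_cast this
  have h4 : (1 : Nat) < m.toNat := by
    by_contra h
    have : Nat.sqrt m.toNat ≤ 1 := by
      calc Nat.sqrt m.toNat ≤ Nat.sqrt 1 := Nat.sqrt_le_sqrt (by omega)
        _ = 1 := by decide
    omega
  have hlt2 : Nat.sqrt m.toNat < m.toNat := Nat.sqrt_lt_self h4
  have hmpos : (0 : Int) < m := by
    rcases Int.lt_or_le 0 m with h | h
    · exact h
    · exfalso; simp [Int.toNat_of_nonpos h] at h4
  have : i < m := by
    have hc : (Nat.sqrt m.toNat : Int) < (m.toNat : Int) := by exact_mod_cast hlt2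
    have hm : (m.toNat : Int) = m := Int.toNat_of_nonneg (le_of_lt hmpos)
    simp only [Int.sqrt] at hle
    omega
  omega

theorem is_prime_eq (m : Int) : is_prime m = isPrimeB m := by
  rw [Bool.eq_iff_iff]
  unfold is_prime isPrimeB isqrtB intSqrtA
  simp only [Bool.not_eq_true', List.any_eq_false, List.all_eq_true]
  constructor
  · intro h i hi
    have h1 := h i hi
    have ht : (i != m) = true := bne_iff_ne.mpr (mem_sqrt_range_ne hi)
    rw [ht, Bool.and_true] at h1
    simpa [bne] using h1
  · intro h i hi
    have h1 := h i hi
    have hz : (PySem.Int.mod m i == 0) = false := by simpa [bne] using h1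
    simp [hz]

theorem group_eq (number : Int) :
    cpySetList (((pyPerms (digitsA number)).foldl
      (fun acc perm =>
        if PySem.Str.len (PySem.Int.toStr (joinA perm)) == 4 then acc ++ [joinA perm]
        else acc) []).filter is_prime) = groupB number := by
  unfold groupB
  have hd : digitsB number = digitsA number := rfl
  have hj : joinB = joinA := rfl
  rw [hd, hj]
  rw [PySem.List.foldl_append_if
        (fun perm => PySem.Str.len (PySem.Int.toStr (joinA perm)) == 4) joinA]
  congr 1
  simp only [List.nil_append, List.filter_map, List.filter_filter]
  congr 1
  refine List.filter_congr ?_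
  intro a _
  simp [Function.comp, is_prime_eq, Bool.and_comm]

theorem contains_ofList (l : List Int) (c : Int) :
    PySem.Set.contains (PySem.Set.ofList l) c = l.contains c := by
  rw [Bool.eq_iff_iff, PySem.Set.contains_eq_listContains]
  simp only [List.contains_iff_mem]
  exact PySem.Set.mem_ofList l c

theorem fan_inner_eq (l : List Int) (i : Int) :
    ∀ (k j : Nat), l.length - j ≤ k →
      fanInnerA l i (PySem.List.pyRange (j : Int) (l.length : Int) 1)
        = ftInnerB (PySem.Set.ofList l) (PySem.List.pyGetD l i 0) (l.drop j) := by
  intro k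
  induction k with
  | zero =>
    intro j hj
    rw [PySem.List.pyRange_one_eq_nil (by exact_mod_cast Nat.le_of_sub_eq_zero (by omega)),
        List.drop_eq_nil_of_le (by omega)]
    rfl
  | succ k ih =>
    intro j hj
    by_cases hlt : j < l.length
    · rw [PySem.List.pyRange_one_cons (by exact_mod_cast hlt),
          List.drop_eq_getElem_cons hlt]
      simp only [fanInnerA, ftInnerB, PySem.List.pyGetD_natCast,
        List.getD_eq_getElem l 0 hlt, contains_ofList]
      have hcast : ((j : Int) + 1) = ((j + 1 : Nat) : Int) := by push_cast; ring
      rw [hcast]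
      split
      · rfl
      · exact ih (j + 1) (by omega)
    · rw [PySem.List.pyRange_one_eq_nil (by exact_mod_cast (by omega : l.length ≤ j)),
          List.drop_eq_nil_of_le (by omega)]
      rfl

theorem fan_outer_eq (l : List Int) :
    ∀ (k j : Nat), l.length - j ≤ k →
      fanOuterA l (PySem.List.pyRange (j : Int) (l.length : Int) 1)
        = ftOuterB (PySem.Set.ofList l) (l.drop j) := by
  intro k
  induction k with
  | zero =>
    intro j hj
    rw [PySem.List.pyRange_one_eq_nil (by exact_mod_cast Nat.le_of_sub_eq_zero (by omega)),
        List.drop_eq_nil_of_le (by omega)]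
    rfl
  | succ k ih =>
    intro j hj
    by_cases hlt : j < l.length
    · rw [PySem.List.pyRange_one_cons (by exact_mod_cast hlt),
          List.drop_eq_getElem_cons hlt]
      simp only [fanOuterA, ftOuterB]
      have hcast : ((j : Int) + 1) = ((j + 1 : Nat) : Int) := by push_cast; ring
      rw [hcast, fan_inner_eq l (j : Int) (l.length - (j + 1)) (j + 1) (by omega)]
      rw [PySem.List.pyGetD_natCast, List.getD_eq_getElem l 0 hlt]
      split
      · rfl
      · exact ih (j + 1) (by omega)
    · rw [PySem.List.pyRange_one_eq_nil (by exact_mod_cast (by omega : l.length ≤ j)),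
          List.drop_eq_nil_of_le (by omega)]
      rfl

theorem fan_eq (l : List Int) : find_arithmetic_nums l = firstTripleB l := by
  unfold find_arithmetic_nums firstTripleB
  have h := fan_outer_eq l l.length 0 (by omega)
  simpa using h

-- contribution of one stored group to A's answer list
def tripOf (item : List Int) : List (List Int) :=
  if item.length < 3 then []
  else match find_arithmetic_nums item with
    | some t => [t]
    | none => []

def triples (gs : List (List Int)) : List (List Int) := gs.flatMap tripOf

theorem stepScanA_eq (primes : List (List Int)) (answer : List (List Int)) :
    stepScanA answer primes = answer ++ triples primes := by
  induction primes generalizing answer with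
  | nil => simp [stepScanA, triples]
  | cons g gs ih =>
    have hstep : stepScanA answer (g :: gs)
        = stepScanA (answer ++ tripOf g) gs := by
      unfold stepScanA tripOf
      simp only [List.foldl_cons]
      congr 1
      split_ifs with h
      · simp
      · cases find_arithmetic_nums g <;> simp
    rw [hstep, ih]
    unfold triples
    simp [List.flatMap_cons]

theorem update_of_subset {α : Type} [BEq α] [LawfulBEq α] (l : List α) :
    ∀ (t : PySem.Set α), (∀ x ∈ l, x ∈ t) → PySem.Set.update t l = t := by
  induction l with
  | nil => intro t _; exact PySem.Set.update_nil t
  | cons x xs ih =>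
    intro t h
    rw [PySem.Set.update_cons, PySem.Set.add_of_mem (h x (by simp))]
    exact ih t (fun y hy => h y (by simp [hy]))

theorem update_absorb (s l : List (List Int)) :
    PySem.Set.update (PySem.Set.update s l) l = PySem.Set.update s l := by
  exact update_of_subset l _ (fun x hx => (PySem.Set.mem_update s l x).mpr (Or.inr hx))

theorem triples_append_singleton (primes : List (List Int)) (pl : List Int) :
    triples (primes ++ [pl]) = triples primes ++ tripOf pl := by
  simp [triples]

theorem ainv_step (answer primes : List (List Int)) (pl : List Int)
    (hinv : ∀ s : PySem.Set (List Int),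
      PySem.Set.update s answer = PySem.Set.update s (triples primes)) :
    ∀ s : PySem.Set (List Int),
      PySem.Set.update s (stepScanA answer (primes ++ [pl]))
        = PySem.Set.update s (triples (primes ++ [pl])) := by
  intro s
  rw [stepScanA_eq, PySem.Set.update_append, hinv s, triples_append_singleton,
      PySem.Set.update_append, PySem.Set.update_append, update_absorb]

theorem bstep_eq (pl : List Int) (tp result : List (List Int))
    (hres : result = PySem.Set.ofList tp) :
    (if 3 ≤ pl.length then
       match firstTripleB pl with
       | some t => PySem.Set.add result t
       | none => result
     else result) = PySem.Set.ofList (tp ++ tripOf pl) := by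
  unfold tripOf
  rw [← fan_eq]
  by_cases h : pl.length < 3
  · rw [if_neg (by omega), if_pos h]; simp [hres]
  · rw [if_pos (by omega), if_neg h]
    cases hfa : find_arithmetic_nums pl with
    | none => simp [hres]
    | some t => simp [hres, PySem.Set.ofList_append_singleton]

def stepA (st : List (List Int) × List (List Int)) (number : Int) :
    List (List Int) × List (List Int) :=
  if is_prime number then
    let num := digitsA number
    let permList := (pyPerms num).foldl
      (fun acc perm =>
        if PySem.Str.len (PySem.Int.toStr (joinA perm)) == 4 then acc ++ [joinA perm]
        else acc) []
    let pl := cpySetList (permList.filter is_prime)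
    let primes' := st.2 ++ [pl]
    (stepScanA st.1 primes', primes')
  else st

def stepB (result : List (List Int)) (number : Int) : List (List Int) :=
  if !(isPrimeB number) then result
  else
    let group := groupB number
    if 3 ≤ group.length then
      match firstTripleB group with
      | some t => PySem.Set.add result t
      | none => result
    else result

theorem stepA_pos (answer primes : List (List Int)) (m : Int) (hpm : is_prime m = true) :
    stepA (answer, primes) m
      = (stepScanA answer (primes ++ [groupB m]), primes ++ [groupB m]) := by
  simp only [stepA, hpm, if_true, group_eq]

theorem stepA_neg (answer primes : List (List Int)) (m : Int) (hpm : is_prime m = false) :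
    stepA (answer, primes) m = (answer, primes) := by
  simp only [stepA, hpm, Bool.false_eq_true, if_false]

theorem stepB_pos (result : List (List Int)) (m : Int) (hpm : isPrimeB m = true) :
    stepB result m
      = (if 3 ≤ (groupB m).length then
           match firstTripleB (groupB m) with
           | some t => PySem.Set.add result t
           | none => result
         else result) := by
  simp only [stepB, hpm, Bool.not_true, Bool.false_eq_true, if_false]

theorem stepB_neg (result : List (List Int)) (m : Int) (hpm : isPrimeB m = false) :
    stepB result m = result := by
  simp only [stepB, hpm, Bool.not_false, if_true]

theorem main_loop (ms : List Int) (answer : List (List Int)) (primes : List (List Int))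
    (result : List (List Int))
    (hinv : ∀ s : PySem.Set (List Int), PySem.Set.update s answer = PySem.Set.update s (triples primes))
    (hres : result = PySem.Set.ofList (triples primes)) :
    PySem.Set.ofList (ms.foldl stepA (answer, primes)).1 = ms.foldl stepB result := by
  induction ms generalizing answer primes result with
  | nil =>
    simp only [List.foldl_nil]
    rw [hres]
    exact hinv []
  | cons m ms ih =>
    simp only [List.foldl_cons]
    by_cases hpm : is_prime m
    · have hB : isPrimeB m = true := by rw [← is_prime_eq]; exact hpm
      rw [stepA_pos answer primes m hpm, stepB_pos result m hB]
      exact ih _ _ _ (ainv_step answer primes (groupB m) hinv)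
        ((bstep_eq (groupB m) (triples primes) result hres).trans
          (by rw [triples_append_singleton]))
    · have hpm' : is_prime m = false := by simpa using hpm
      have hB : isPrimeB m = false := by rw [← is_prime_eq]; exact hpm'
      rw [stepA_neg answer primes m hpm', stepB_neg result m hB]
      exact ih _ _ _ hinv hres

-- ===== VERDICT (by name: the statement is the Claim_ definition above) =====
theorem prime_permutations_spec : Claim_equal_prime_permutations := by
  intro n _
  unfold Spec_prime_permutations
  have h := main_loop (PySem.List.pyRange 1000 n 1) [] [] [] (fun s => rfl) rfl
  calc prime_permutations n
      = PySem.Set.ofList ((PySem.List.pyRange 1000 n 1).foldl stepA ([], [])).1 := rfl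
    _ = (PySem.List.pyRange 1000 n 1).foldl stepB [] := h
    _ = prime_permutations_alt n := rfl
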